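-- pv_equiv track=rewrite | github.com/ochavarria/Proyectos-TEC | Progras/Python/Introduccion/Calendario.py | buscando_FyT
-- ===== SOURCE A (Python) =====
-- def buscando_FyT(lista,titulo,Fecha):
--     if(lista==[]):
--         return []
--     else:
--         if(pertenece(lista[0],titulo)and(pertenece(lista[0],Fecha))):
--             return lista[0]+buscando_FyT(lista[1:],titulo,Fecha)
--
--         else:
--             return buscando_FyT(lista[1:],titulo,Fecha)
--
-- def pertenece(lista,inp):
--     if(lista==[]):
--         return False
--     else:
--         if(lista[0]==inp):
--             return True
--         else:
--             return pertenece(lista[1:],inp)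
-- ===== SOURCE B (Python) =====
-- def buscando_FyT(lista, titulo, Fecha):
--     resultado = []
--     for entry in lista:
--         if titulo in entry and Fecha in entry:
--             resultado = resultado + entry
--     return resultado
-- ===== Notes on version B (the rewrite author's own statement) =====
-- stated objective: simpler
-- what changed: Replaces the structural recursion over lista[1:] and the recursive pertenece membership scan with a single flat accumulator loop using the in operator.
import Mathlib
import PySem

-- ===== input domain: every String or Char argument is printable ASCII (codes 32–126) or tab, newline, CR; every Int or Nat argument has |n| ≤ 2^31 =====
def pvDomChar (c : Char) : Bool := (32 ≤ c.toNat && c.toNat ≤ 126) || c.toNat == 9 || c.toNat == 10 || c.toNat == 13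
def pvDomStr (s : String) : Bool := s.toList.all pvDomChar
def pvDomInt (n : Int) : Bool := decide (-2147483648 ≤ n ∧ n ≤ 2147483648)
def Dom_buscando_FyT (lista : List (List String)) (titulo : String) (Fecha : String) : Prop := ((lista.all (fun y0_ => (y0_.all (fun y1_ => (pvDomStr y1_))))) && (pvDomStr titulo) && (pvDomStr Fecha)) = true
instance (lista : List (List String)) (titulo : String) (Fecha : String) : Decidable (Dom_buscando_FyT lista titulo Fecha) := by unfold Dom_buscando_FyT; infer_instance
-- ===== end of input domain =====

-- B replaces the two recursive helpers with one flat accumulator loop using membership; objective: simpler.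
-- ===== PORT A =====
def pertenece (lista : List String) (inp : String) : Bool :=
  match lista with
  | [] => false
  | x :: rest => if x == inp then true else pertenece rest inp

def buscando_FyT (lista : List (List String)) (titulo : String) (Fecha : String) : List String :=
  match lista with
  | [] => []
  | e :: rest =>
    if pertenece e titulo && pertenece e Fecha then
      e ++ buscando_FyT rest titulo Fecha
    else
      buscando_FyT rest titulo Fecha

-- ===== PORT B =====
def buscando_FyT_alt (lista : List (List String)) (titulo : String) (Fecha : String) : List String :=
  lista.foldl (fun resultado entry =>
    if entry.contains titulo && entry.contains Fecha then resultado ++ entry else resultado) []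

-- ===== PRECONDITION & SPEC =====
def Spec_buscando_FyT (lista : List (List String)) (titulo : String) (Fecha : String) (out : List String) : Prop := out = buscando_FyT_alt lista titulo Fecha
instance (lista : List (List String)) (titulo : String) (Fecha : String) (out : List String) : Decidable (Spec_buscando_FyT lista titulo Fecha out) := by unfold Spec_buscando_FyT; infer_instance

-- ===== CLAIM (what is proved, stated in full; the proofs are below) =====
def Claim_equal_buscando_FyT : Prop := ∀ (lista : List (List String)) (titulo : String) (Fecha : String), Dom_buscando_FyT lista titulo Fecha → Spec_buscando_FyT lista titulo Fecha (buscando_FyT lista titulo Fecha)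

-- ===== LEMMAS AND PROOFS =====

-- ===== VERDICT (by name: the statement is the Claim_ definition above) =====
lemma pertenece_eq_contains (lista : List String) (inp : String) :
    pertenece lista inp = lista.contains inp := by
  induction lista with
  | nil => rfl
  | cons x rest ih =>
    rw [pertenece, ih]
    by_cases h : x = inp
    · subst h; simp
    · have hix : (inp == x) = false := by
        simp only [beq_eq_false_iff_ne, ne_eq]
        exact fun e => h (Eq.symm e)
      simp only [beq_iff_eq, h, if_false, List.contains_cons, hix, Bool.false_or]

lemma foldl_acc (lista : List (List String)) (titulo Fecha : String) (acc : List String) :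
    lista.foldl (fun resultado entry =>
      if entry.contains titulo && entry.contains Fecha then resultado ++ entry else resultado) acc
    = acc ++ buscando_FyT lista titulo Fecha := by
  induction lista generalizing acc with
  | nil => simp [buscando_FyT]
  | cons e rest ih =>
    rw [List.foldl_cons, buscando_FyT, pertenece_eq_contains, pertenece_eq_contains]
    by_cases h : (e.contains titulo && e.contains Fecha) = true
    · rw [if_pos h, if_pos h, ih, List.append_assoc]
    · rw [if_neg h, if_neg h, ih]

theorem buscando_FyT_spec : Claim_equal_buscando_FyT := by
  intro lista titulo Fecha _
  unfold Spec_buscando_FyT buscando_FyT_alt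
  rw [foldl_acc, List.nil_append]
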